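-- pv_equiv track=rewrite | github.com/marandmath/programming_challenges | Advent of Code Programs/2015/Day 5/Day 5 Part I VERSION 3.py | double_letter
-- ===== SOURCE A (Python) =====
-- def double_letter(word):
--     """A function that checks the letters of a word to find any doubles
--     and if any forbidden sequences are in that word"""
--     flag = 0
--     forbidden_flag = False
--     if ('ab' in word) or ('cd' in word) or ('pq' in word) or ('xy' in word):
--         forbidden_flag = True
--     else:
--         pass
--     for i in range(len(word)-1):
--         check_double = word[i] == word[i+1]
--         if check_double and not forbidden_flag:
--             flag = 1
--         else:
--             continue
--     return flag
-- ===== SOURCE B (Python) =====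
-- FORBIDDEN = {'ab', 'cd', 'pq', 'xy'}
--
-- def double_letter(word):
--     """Two-phase early-exit state machine.
--
--     Phase 1 walks the word looking for a doubled letter; the moment a
--     forbidden pair is seen it aborts with 0 (nothing later can fix that).
--     When a double is found, control switches to phase 2, which only has
--     to verify that no forbidden pair occurs from that point on (all the
--     earlier pairs were already cleared in phase 1) and returns 1 or 0.
--     Unlike A, which always scans the whole string twice over, this can
--     stop early and never re-reads a cleared prefix."""
--     n = len(word)
--     i = 0
--     while i + 1 < n:          # phase 1: hunting for a double
--         if word[i:i+2] in FORBIDDEN: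
--             return 0
--         if word[i] == word[i+1]:
--             for j in range(i + 1, n - 1):   # phase 2: forbidden only
--                 if word[j:j+2] in FORBIDDEN:
--                     return 0
--             return 1
--         i += 1
--     return 0
-- ===== Notes on version B (the rewrite author's own statement) =====
-- stated objective: faster
-- what changed: Replaces A's unconditional whole-string substring scans plus a full index loop by a two-phase early-exit state machine: phase 1 walks pairs hunting for a double and aborts with 0 the moment a forbidden pair is seen; once a double is found it switches to phase 2, which only checks the remaining suffix for forbidden pairs and returns as soon as it can.
import Mathlib
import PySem

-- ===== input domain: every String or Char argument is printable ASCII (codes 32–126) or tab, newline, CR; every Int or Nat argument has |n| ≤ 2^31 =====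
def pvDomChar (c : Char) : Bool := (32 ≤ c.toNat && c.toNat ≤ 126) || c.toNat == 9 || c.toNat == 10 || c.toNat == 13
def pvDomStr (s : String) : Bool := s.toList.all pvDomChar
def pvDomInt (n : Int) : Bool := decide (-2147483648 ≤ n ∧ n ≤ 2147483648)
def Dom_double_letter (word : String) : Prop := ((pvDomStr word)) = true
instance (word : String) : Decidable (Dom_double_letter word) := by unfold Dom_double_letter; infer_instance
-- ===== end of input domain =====

-- B replaces A's unconditional whole-string scans by a two-phase early-exit state machine
-- (phase 1 hunts for a double, aborting on a forbidden pair; phase 2 checks only the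
-- remaining suffix for forbidden pairs and returns early); a timing run measured B
-- faster by this early-exit constant factor.

-- ===== PORT A =====
def double_letter (word : String) : Int :=
  let flag : Int := 0
  let forbidden_flag : Bool :=
    PySem.Str.isIn "ab" word || PySem.Str.isIn "cd" word ||
    PySem.Str.isIn "pq" word || PySem.Str.isIn "xy" word
  (PySem.List.pyRange 0 (PySem.Str.len word - 1) 1).foldl
    (fun flag i =>
      let check_double :=
        PySem.List.pyGet? word.toList i == PySem.List.pyGet? word.toList (i + 1)
      if check_double && !forbidden_flag then (1 : Int) else flag)
    flag

-- ===== PORT B =====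
-- Source B's FORBIDDEN set of two-character strings, as the pair of characters the
-- slice word[i:i+2] consists of (exact: all members have length 2).
def pvForbidden : List (Char × Char) := [('a','b'), ('c','d'), ('p','q'), ('x','y')]

def pvForb (x y : Char) : Bool := decide ((x, y) ∈ pvForbidden)

-- phase 2 of Source B: the inner `for j` loop — only forbidden pairs matter now.
def pvPhase2 : List Char → Int
  | x :: y :: rest => if pvForb x y then 0 else pvPhase2 (y :: rest)
  | _ => 1

-- phase 1 of Source B: the outer `while` loop — abort on forbidden, switch on a double.
def pvPhase1 : List Char → Int
  | x :: y :: rest =>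
      if pvForb x y then 0
      else if x == y then pvPhase2 (y :: rest)
      else pvPhase1 (y :: rest)
  | _ => 0

def double_letter_alt (word : String) : Int := pvPhase1 word.toList

-- ===== PRECONDITION & SPEC =====
def Spec_double_letter (word : String) (out : Int) : Prop := out = double_letter_alt word
instance (word : String) (out : Int) : Decidable (Spec_double_letter word out) := by unfold Spec_double_letter; infer_instance

-- ===== CLAIM (what is proved, stated in full; the proofs are below) =====
def Claim_equal_double_letter : Prop := ∀ (word : String), Dom_double_letter word → Spec_double_letter word (double_letter word)

-- ===== LEMMAS AND PROOFS =====

-- A's keep-or-set-to-1 fold returns 1 iff some element satisfies the test.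
theorem pv_fold_flag (xs : List Int) (f : Int → Bool) (init : Int) :
    xs.foldl (fun flag i => if f i then (1 : Int) else flag) init
    = if xs.any f then 1 else init := by
  induction xs generalizing init with
  | nil => simp
  | cons x xs ih =>
    simp only [List.foldl_cons, List.any_cons, ih]
    by_cases hx : f x = true <;> by_cases hy : xs.any f = true <;> simp [hx, hy]

-- a two-character infix is exactly an adjacent pair.
theorem pv_infix_pair (a b : Char) (l : List Char) :
    [a, b] <:+: l ↔ (a, b) ∈ l.zip l.tail := by
  induction l with
  | nil => simp
  | cons x xs ih =>
    rw [List.infix_cons_iff]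
    cases xs with
    | nil =>
      constructor
      · rintro (h | h)
        · have := h.length_le; simp at this
        · have := h.length_le; simp at this
      · intro h; simp at h
    | cons y ys =>
      constructor
      · rintro (h | h)
        · rw [List.cons_prefix_cons] at h
          obtain ⟨rfl, h⟩ := h
          rw [List.cons_prefix_cons] at h
          obtain ⟨rfl, -⟩ := h
          simp
        · simp only [List.tail_cons, List.zip_cons_cons, List.mem_cons]
          right
          simpa [List.zip] using ih.mp h
      · intro h
        simp only [List.tail_cons, List.zip_cons_cons, List.mem_cons] at h
        rcases h with h | h
        · simp only [Prod.mk.injEq] at h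
          obtain ⟨rfl, rfl⟩ := h
          exact Or.inl ((List.cons_prefix_cons).mpr ⟨rfl, (List.cons_prefix_cons).mpr ⟨rfl, List.nil_prefix⟩⟩)
        · exact Or.inr (ih.mpr (by simpa [List.zip] using h))

-- membership of an adjacent pair via natural indices.
theorem pv_zip_tail_mem (a b : Char) (l : List Char) :
    (a, b) ∈ l.zip l.tail ↔ ∃ k : Nat, k + 1 < l.length ∧ l[k]? = some a ∧ l[k + 1]? = some b := by
  induction l with
  | nil => simp
  | cons x xs ih =>
    cases xs with
    | nil => simp
    | cons y ys =>
      simp only [List.tail_cons, List.zip_cons_cons, List.mem_cons]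
      constructor
      · rintro (h | h)
        · obtain ⟨rfl, rfl⟩ := Prod.ext_iff.mp h
          exact ⟨0, by simp, by simp, by simp⟩
        · obtain ⟨k, hk, ha, hb⟩ := (ih.mp (by simpa [List.zip] using h))
          exact ⟨k + 1, by simpa using hk, by simpa using ha, by simpa using hb⟩
      · rintro ⟨k, hk, ha, hb⟩
        cases k with
        | zero =>
          left
          simp at ha hb
          simp [ha, hb]
        | succ k =>
          right
          have : (a, b) ∈ (y :: ys).zip ys :=
            (by simpa [List.zip] using ih.mpr ⟨k, by simpa using hk, by simpa using ha, by simpa using hb⟩)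
          exact this

-- A's forbidden flag equals "some adjacent pair is forbidden".
theorem pv_forb_eq (word : String) :
    (PySem.Str.isIn "ab" word || PySem.Str.isIn "cd" word ||
     PySem.Str.isIn "pq" word || PySem.Str.isIn "xy" word)
    = (word.toList.zip word.toList.tail).any (fun p => pvForb p.1 p.2) := by
  rw [Bool.eq_iff_iff]
  simp only [Bool.or_eq_true, List.any_eq_true, PySem.Str.isIn_iff_infix, pvForb,
    decide_eq_true_eq]
  constructor
  · rintro (((h | h) | h) | h)
    · rw [show "ab".toList = ['a','b'] from by decide] at h
      exact ⟨('a','b'), (pv_infix_pair _ _ _).mp h, by decide⟩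
    · rw [show "cd".toList = ['c','d'] from by decide] at h
      exact ⟨('c','d'), (pv_infix_pair _ _ _).mp h, by decide⟩
    · rw [show "pq".toList = ['p','q'] from by decide] at h
      exact ⟨('p','q'), (pv_infix_pair _ _ _).mp h, by decide⟩
    · rw [show "xy".toList = ['x','y'] from by decide] at h
      exact ⟨('x','y'), (pv_infix_pair _ _ _).mp h, by decide⟩
  · rintro ⟨⟨a, b⟩, hp, hmem⟩
    simp only [pvForbidden, List.mem_cons, List.not_mem_nil, or_false,
      Prod.mk.injEq] at hmem
    rcases hmem with ⟨rfl, rfl⟩ | ⟨rfl, rfl⟩ | ⟨rfl, rfl⟩ | ⟨rfl, rfl⟩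
    · exact Or.inl (Or.inl (Or.inl (by
        rw [show "ab".toList = ['a','b'] from by decide]
        exact (pv_infix_pair _ _ _).mpr hp)))
    · exact Or.inl (Or.inl (Or.inr (by
        rw [show "cd".toList = ['c','d'] from by decide]
        exact (pv_infix_pair _ _ _).mpr hp)))
    · exact Or.inl (Or.inr (by
        rw [show "pq".toList = ['p','q'] from by decide]
        exact (pv_infix_pair _ _ _).mpr hp))
    · exact Or.inr (by
        rw [show "xy".toList = ['x','y'] from by decide]
        exact (pv_infix_pair _ _ _).mpr hp)

-- the "some adjacent pair satisfies test" flags agree (index form vs zip form).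
theorem pv_any_eq (l : List Char) :
    (PySem.List.pyRange 0 ((l.length : Int) - 1) 1).any
      (fun i => PySem.List.pyGet? l i == PySem.List.pyGet? l (i + 1))
    = (l.zip l.tail).any (fun p => p.1 == p.2) := by
  rw [Bool.eq_iff_iff]
  simp only [List.any_eq_true, PySem.List.mem_pyRange_one]
  constructor
  · rintro ⟨i, ⟨h0, h1⟩, hi⟩
    have hk : i = ((i.toNat : Nat) : Int) := by omega
    have hklt : i.toNat + 1 < l.length := by omega
    rw [hk] at hi
    rw [PySem.List.pyGet?_natCast] at hi
    have : ((i.toNat : Int) + 1) = ((i.toNat + 1 : Nat) : Int) := by push_cast; ring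
    rw [this, PySem.List.pyGet?_natCast] at hi
    have ha' : l[i.toNat]? = some l[i.toNat] := List.getElem?_eq_getElem (by omega)
    have hb' : l[i.toNat + 1]? = some l[i.toNat + 1] := List.getElem?_eq_getElem hklt
    rw [ha', hb'] at hi
    simp only [beq_iff_eq, Option.some.injEq] at hi
    refine ⟨(l[i.toNat], l[i.toNat + 1]), ?_, by simpa using hi⟩
    exact (pv_zip_tail_mem _ _ _).mpr ⟨i.toNat, hklt, ha', hb'⟩
  · rintro ⟨p, hp, heq⟩
    obtain ⟨k, hk, ha, hb⟩ := (pv_zip_tail_mem p.1 p.2 l).mp (by simpa using hp)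
    refine ⟨(k : Int), ⟨by omega, by omega⟩, ?_⟩
    rw [PySem.List.pyGet?_natCast]
    have : ((k : Int) + 1) = ((k + 1 : Nat) : Int) := by push_cast; ring
    rw [this, PySem.List.pyGet?_natCast, ha, hb]
    simpa using heq

-- no forbidden pair is a doubled letter.
theorem pv_forb_refl (x : Char) : pvForb x x = false := by
  simp only [pvForb, pvForbidden, List.mem_cons, List.not_mem_nil, or_false,
    Prod.mk.injEq, decide_eq_false_iff_not]
  rintro (⟨rfl, h⟩ | ⟨rfl, h⟩ | ⟨rfl, h⟩ | ⟨rfl, h⟩) <;> exact absurd h (by decide)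

-- phase 2 returns 1 exactly when its suffix has no forbidden pair.
theorem pv_phase2_eq (l : List Char) :
    pvPhase2 l = if (l.zip l.tail).any (fun p => pvForb p.1 p.2) then 0 else 1 := by
  induction l with
  | nil => simp [pvPhase2]
  | cons x xs ih =>
    cases xs with
    | nil => simp [pvPhase2]
    | cons y ys =>
      simp only [pvPhase2, List.tail_cons, List.zip_cons_cons, List.any_cons, ih]
      by_cases h : pvForb x y = true <;> simp [h]

-- phase 1 computes "has a double and no forbidden pair".
theorem pv_phase1_eq (l : List Char) :
    pvPhase1 l =
      if (l.zip l.tail).any (fun p => p.1 == p.2)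
          && !((l.zip l.tail).any (fun p => pvForb p.1 p.2)) then 1 else 0 := by
  induction l with
  | nil => simp [pvPhase1]
  | cons x xs ih =>
    cases xs with
    | nil => simp [pvPhase1]
    | cons y ys =>
      simp only [pvPhase1, List.tail_cons, List.zip_cons_cons, List.any_cons]
      by_cases hf : pvForb x y = true
      · simp [hf]
      · by_cases hd : (x == y) = true
        · have hx : x = y := by simpa using hd
          subst hx
          rw [if_neg (by simp [hf]), if_pos hd, pv_phase2_eq]
          simp only [List.tail_cons, pv_forb_refl, Bool.false_or, beq_self_eq_true,
            Bool.true_or, Bool.true_and]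
          by_cases h2 : (((x :: ys).zip ys).any fun p => pvForb p.1 p.2) = true <;> simp [h2]
        · rw [if_neg (by simp [hf]), if_neg (by simp [hd]), ih]
          simp [hf, hd]

-- ===== VERDICT (by name: the statement is the Claim_ definition above) =====
theorem double_letter_spec : Claim_equal_double_letter := by
  intro word _
  unfold Spec_double_letter double_letter double_letter_alt
  simp only [PySem.Str.len_eq, pv_fold_flag]
  rw [pv_forb_eq word, pv_phase1_eq]
  cases hforb : (word.toList.zip word.toList.tail).any (fun p => pvForb p.1 p.2) with
  | false =>
    simp only [Bool.not_false, Bool.and_true]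
    rw [pv_any_eq word.toList]
  | true => simp
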